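-- pv_equiv track=rewrite | github.com/Richarbe/CS454-Antidictionaries | slowCompressor.py | __isInAntiDict
-- ===== SOURCE A (Python) =====
-- def __isInAntiDict(antiDict,word):
--
--     if len(word) >= 1:
--         suf = word
--     else:
--         return (False,'')
--
--     for w in antiDict:
--
--         s = suf
--
--         while len(s) >= 1:
--
--             if w == (s + '0'):
--                 return (True,'1')
--             elif w == (s + '1'):
--                 return (True, '0')
--             else:
--                 s = s[1:]
--
--     return (False,'')
-- ===== SOURCE B (Python) =====
-- def __isInAntiDict(antiDict, word):
--     # Precompute the set of all nonempty suffixes of word, then do a flat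
--     # O(1)-membership check per dictionary word instead of rescanning suffixes.
--     sufs = set()
--     s = word
--     while len(s) >= 1:
--         sufs.add(s)
--         s = s[1:]
--     for w in antiDict:
--         if w and w[-1] in '01' and w[:-1] in sufs:
--             return (True, '1' if w[-1] == '0' else '0')
--     return (False, '')
-- ===== Notes on version B (the rewrite author's own statement) =====
-- stated objective: faster
-- what changed: Instead of rescanning every nonempty suffix of word for each dictionary entry, B precomputes the set of nonempty suffixes once and replaces the inner while-loop by a flat check that w ends in '0'/'1' and w[:-1] is in that set.
import Mathlib
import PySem

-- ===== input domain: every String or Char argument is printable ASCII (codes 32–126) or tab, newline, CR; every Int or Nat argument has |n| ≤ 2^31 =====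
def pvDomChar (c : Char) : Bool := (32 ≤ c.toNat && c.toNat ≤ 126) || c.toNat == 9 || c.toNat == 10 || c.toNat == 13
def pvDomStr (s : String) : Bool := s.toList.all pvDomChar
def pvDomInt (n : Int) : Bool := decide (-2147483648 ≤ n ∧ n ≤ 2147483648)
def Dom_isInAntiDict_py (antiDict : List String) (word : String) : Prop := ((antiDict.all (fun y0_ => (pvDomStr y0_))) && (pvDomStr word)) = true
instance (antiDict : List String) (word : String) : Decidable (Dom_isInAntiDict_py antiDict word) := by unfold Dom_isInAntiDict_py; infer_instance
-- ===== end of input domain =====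

-- B replaces the per-word rescan of all suffixes by one precomputed suffix set plus a
-- flat last-character/membership test per dictionary word (objective: alternative).


-- ===== PORT A =====
-- the inner 'while len(s) >= 1' loop of A, for a fixed w; 'some r' = early return r
def pvAinner (w : List Char) (s : List Char) : Option (Bool × String) :=
  if s.length ≥ 1 then
    if w = s ++ ['0'] then some (true, "1")
    else if w = s ++ ['1'] then some (true, "0")
    else pvAinner w s.tail
  else none
termination_by s.length
decreasing_by cases s with
  | nil => simp at *
  | cons a t => simp

-- the 'for w in antiDict' loop of A
def pvAouter (antiDict : List (List Char)) (suf : List Char) : Bool × String :=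
  match antiDict with
  | [] => (false, "")
  | w :: rest =>
    match pvAinner w suf with
    | some r => r
    | none => pvAouter rest suf

def isInAntiDict_py (antiDict : List String) (word : String) : Bool × String :=
  if word.toList.length ≥ 1 then
    pvAouter (antiDict.map String.toList) word.toList
  else (false, "")

-- ===== PORT B =====
-- the 'while' loop of B building the set of all nonempty suffixes of word
def pvBsufs (s : List Char) (acc : PySem.Set (List Char)) : PySem.Set (List Char) :=
  if s.length ≥ 1 then pvBsufs s.tail (PySem.Set.add acc s) else acc
termination_by s.length
decreasing_by cases s with
  | nil => simp at *
  | cons a t => simp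

-- the 'for w in antiDict' loop of B
def pvBloop (antiDict : List (List Char)) (sufs : PySem.Set (List Char)) : Bool × String :=
  match antiDict with
  | [] => (false, "")
  | w :: rest =>
    if w ≠ [] ∧ (w.getLast? = some '0' ∨ w.getLast? = some '1') ∧ PySem.Set.contains sufs w.dropLast
    then (true, if w.getLast? = some '0' then "1" else "0")
    else pvBloop rest sufs

def isInAntiDict_py_alt (antiDict : List String) (word : String) : Bool × String :=
  pvBloop (antiDict.map String.toList) (pvBsufs word.toList PySem.Set.empty)

-- ===== PRECONDITION & SPEC =====
def Spec_isInAntiDict_py (antiDict : List String) (word : String) (out : Bool × String) : Prop := out = isInAntiDict_py_alt antiDict word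
instance (antiDict : List String) (word : String) (out : Bool × String) : Decidable (Spec_isInAntiDict_py antiDict word out) := by unfold Spec_isInAntiDict_py; infer_instance

-- ===== CLAIM (what is proved, stated in full; the proofs are below) =====
def Claim_equal_isInAntiDict_py : Prop := ∀ (antiDict : List String) (word : String), Dom_isInAntiDict_py antiDict word → Spec_isInAntiDict_py antiDict word (isInAntiDict_py antiDict word)

-- ===== LEMMAS AND PROOFS =====

theorem pvConcat_getLast? {w : List Char} {c : Char} (h : w.getLast? = some c) :
    w.dropLast ++ [c] = w := by
  induction w using List.reverseRecOn with
  | nil => simp at h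
  | append_singleton l a _ =>
    simp only [List.getLast?_concat, Option.some_inj] at h
    simp [h]

-- membership in the built suffix set = being a nonempty suffix
theorem pvBsufs_mem (s : List Char) (acc : PySem.Set (List Char)) (x : List Char) :
    x ∈ pvBsufs s acc ↔ x ∈ acc ∨ (x <:+ s ∧ x ≠ []) := by
  induction s, acc using pvBsufs.induct with
  | case1 s acc h ih =>
    rw [pvBsufs, if_pos h, ih]
    cases s with
    | nil => simp at h
    | cons a t =>
      simp only [List.tail_cons, PySem.Set.mem_add, List.suffix_cons_iff]
      constructor
      · rintro ((hx | rfl) | ⟨hs, hne⟩)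
        · exact Or.inl hx
        · exact Or.inr ⟨Or.inl rfl, by simp⟩
        · exact Or.inr ⟨Or.inr hs, hne⟩
      · rintro (hx | ⟨(rfl | hs), hne⟩)
        · exact Or.inl (Or.inl hx)
        · exact Or.inl (Or.inr rfl)
        · exact Or.inr ⟨hs, hne⟩
  | case2 s acc h =>
    rw [pvBsufs, if_neg h]
    have : s = [] := by cases s <;> simp_all
    subst this; simp

-- A's inner scan over the suffixes of s, characterised by B's flat test
theorem pvAinner_eq (w s : List Char) :
    pvAinner w s =
      (if w ≠ [] ∧ (w.getLast? = some '0' ∨ w.getLast? = some '1') ∧ (w.dropLast <:+ s ∧ w.dropLast ≠ [])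
       then some (true, if w.getLast? = some '0' then "1" else "0")
       else none) := by
  induction s using pvAinner.induct w with
  | case1 s hlen h0 =>
    subst h0
    have hs : s ≠ [] := by cases s <;> simp_all
    have hg : (s ++ ['0']).getLast? = some '0' := by simp
    have hd : (s ++ ['0']).dropLast = s := by simp
    rw [pvAinner, if_pos hlen, if_pos rfl,
        if_pos ⟨by simp, Or.inl hg, by rw [hd]; exact ⟨List.suffix_refl s, hs⟩⟩, if_pos hg]
  | case2 s hlen h0 h1 =>
    subst h1
    have hs : s ≠ [] := by cases s <;> simp_all
    have hg : (s ++ ['1']).getLast? = some '1' := by simp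
    have hd : (s ++ ['1']).dropLast = s := by simp
    rw [pvAinner, if_pos hlen, if_neg h0, if_pos rfl,
        if_pos ⟨by simp, Or.inr hg, by rw [hd]; exact ⟨List.suffix_refl s, hs⟩⟩,
        if_neg (by simp [hg])]
  | case3 s hlen h0 h1 ih =>
    rw [pvAinner, if_pos hlen, if_neg h0, if_neg h1, ih]
    refine if_congr ?_ rfl rfl
    constructor
    · rintro ⟨hw, hl, hsuf, hne⟩
      exact ⟨hw, hl, hsuf.trans (List.tail_suffix s), hne⟩
    · rintro ⟨hw, hl, ⟨pre, hpre⟩, hne⟩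
      refine ⟨hw, hl, ?_, hne⟩
      cases pre with
      | nil =>
        -- w.dropLast = s would force w = s ++ ['0'] or w = s ++ ['1']
        exfalso
        simp only [List.nil_append] at hpre
        rcases hl with hc | hc
        · exact h0 (by rw [← pvConcat_getLast? hc, hpre])
        · exact h1 (by rw [← pvConcat_getLast? hc, hpre])
      | cons b p =>
        exact ⟨p, by have := hpre; cases s with
          | nil => simp at hlen
          | cons a t => simpa using congrArg List.tail hpre⟩
  | case4 s hlen =>
    rw [pvAinner, if_neg hlen]
    have hs : s = [] := by cases s <;> simp_all
    subst hs
    rw [if_neg]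
    rintro ⟨_, _, hsuf, hne⟩
    exact hne (List.suffix_nil.mp hsuf)

-- the two for-loops agree for any word (suffix set built from that word)
theorem pvLoops_eq (antiDict : List (List Char)) (word : List Char) :
    pvAouter antiDict word = pvBloop antiDict (pvBsufs word PySem.Set.empty) := by
  induction antiDict with
  | nil => rfl
  | cons w rest ih =>
    rw [pvAouter, pvBloop, pvAinner_eq]
    have hmem : (PySem.Set.contains (pvBsufs word PySem.Set.empty) w.dropLast = true)
        ↔ (w.dropLast <:+ word ∧ w.dropLast ≠ []) := by
      rw [PySem.Set.contains_iff, pvBsufs_mem]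
      simp [PySem.Set.empty]
    by_cases h : w ≠ [] ∧ (w.getLast? = some '0' ∨ w.getLast? = some '1') ∧ (w.dropLast <:+ word ∧ w.dropLast ≠ [])
    · have h' : w ≠ [] ∧ (w.getLast? = some '0' ∨ w.getLast? = some '1') ∧
          PySem.Set.contains (pvBsufs word PySem.Set.empty) w.dropLast = true :=
        ⟨h.1, h.2.1, hmem.mpr h.2.2⟩
      rw [if_pos h, if_pos h']
    · rw [if_neg h, if_neg (by rintro ⟨hw, hl, hc⟩; exact h ⟨hw, hl, hmem.mp hc⟩), ih]

-- B returns (false,'') on the empty word: the suffix set is empty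
theorem pvBloop_empty (antiDict : List (List Char)) :
    pvBloop antiDict (pvBsufs [] PySem.Set.empty) = (false, "") := by
  induction antiDict with
  | nil => rfl
  | cons w rest ih =>
    rw [pvBloop, if_neg, ih]
    rintro ⟨hw, hlast, hmem⟩
    rw [PySem.Set.contains_iff, pvBsufs_mem] at hmem
    simp [PySem.Set.empty] at hmem

-- ===== VERDICT (by name: the statement is the Claim_ definition above) =====
theorem isInAntiDict_py_spec : Claim_equal_isInAntiDict_py := by
  intro antiDict word _
  unfold Spec_isInAntiDict_py isInAntiDict_py isInAntiDict_py_alt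
  by_cases h : word.toList.length ≥ 1
  · rw [if_pos h, pvLoops_eq]
  · rw [if_neg h]
    have : word.toList = [] := by cases hw : word.toList <;> simp_all
    rw [this, pvBloop_empty]
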